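-- pv_equiv track=rewrite | github.com/PythonADI/python-125 | workshop_5/5_practical_examples.py | group_by_grade
-- ===== SOURCE A (Python) =====
-- def group_by_grade(students):
--     groups = {"A": [], "B": [], "C": [], "D": [], "F": []}
--     for name, score in students:
--         if score >= 90:
--             groups["A"].append(name)
--         elif score >= 80:
--             groups["B"].append(name)
--         elif score >= 70:
--             groups["C"].append(name)
--         elif score >= 60:
--             groups["D"].append(name)
--         else:
--             groups["F"].append(name)
--     return groups
-- ===== SOURCE B (Python) =====
-- def group_by_grade(students):
--     letters = "FDCBA"
--
--     def letter(score):
--         return letters[sum(score >= t for t in (60, 70, 80, 90))]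
--
--     return {g: [name for name, score in students if letter(score) == g]
--             for g in "ABCDF"}
-- ===== Notes on version B (the rewrite author's own statement) =====
-- stated objective: alternative
-- what changed: Replaces the single-pass if/elif ladder appending into a mutable dict by a threshold-count letter function plus one filtering comprehension per grade bucket.
import Mathlib
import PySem

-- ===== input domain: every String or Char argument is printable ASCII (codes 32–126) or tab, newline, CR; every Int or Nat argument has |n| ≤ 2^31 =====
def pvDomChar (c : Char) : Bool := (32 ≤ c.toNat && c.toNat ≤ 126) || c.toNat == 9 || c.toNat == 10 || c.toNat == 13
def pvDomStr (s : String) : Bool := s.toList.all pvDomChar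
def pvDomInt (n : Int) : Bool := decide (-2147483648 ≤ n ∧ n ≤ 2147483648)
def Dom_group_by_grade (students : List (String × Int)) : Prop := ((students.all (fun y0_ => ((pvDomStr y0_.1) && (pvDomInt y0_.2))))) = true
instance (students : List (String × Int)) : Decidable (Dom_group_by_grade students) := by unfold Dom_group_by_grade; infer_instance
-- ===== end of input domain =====

-- B replaces A's if/elif ladder appending into a mutable dict by a threshold-count
-- letter function and one filtering comprehension per grade bucket (alternative decomposition).


-- ===== PORT A =====
-- for name, score in students: append name to the bucket chosen by the if/elif ladder
def group_by_grade_step (d : PySem.Dict String (List String)) (p : String × Int) :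
    PySem.Dict String (List String) :=
  if p.2 ≥ 90 then d.modify "A" [] (· ++ [p.1])
  else if p.2 ≥ 80 then d.modify "B" [] (· ++ [p.1])
  else if p.2 ≥ 70 then d.modify "C" [] (· ++ [p.1])
  else if p.2 ≥ 60 then d.modify "D" [] (· ++ [p.1])
  else d.modify "F" [] (· ++ [p.1])

def group_by_grade (students : List (String × Int)) : List (String × List String) :=
  (students.foldl group_by_grade_step
    (PySem.Dict.ofList [("A", []), ("B", []), ("C", []), ("D", []), ("F", [])])).items

-- ===== PORT B =====
-- letters[sum(score >= t for t in (60, 70, 80, 90))]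
def gradeLetter (score : Int) : String :=
  ["F", "D", "C", "B", "A"].getD
    ((if score ≥ 60 then 1 else 0) + (if score ≥ 70 then 1 else 0) +
     (if score ≥ 80 then 1 else 0) + (if score ≥ 90 then 1 else 0)) "F"

def group_by_grade_alt (students : List (String × Int)) : List (String × List String) :=
  ["A", "B", "C", "D", "F"].map
    (fun g => (g, (students.filter (fun p => gradeLetter p.2 == g)).map Prod.fst))

-- ===== PRECONDITION & SPEC =====
def Spec_group_by_grade (students : List (String × Int)) (out : List (String × List String)) : Prop := out = group_by_grade_alt students
instance (students : List (String × Int)) (out : List (String × List String)) : Decidable (Spec_group_by_grade students out) := by unfold Spec_group_by_grade; infer_instance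

-- ===== CLAIM (what is proved, stated in full; the proofs are below) =====
def Claim_equal_group_by_grade : Prop := ∀ (students : List (String × Int)), Dom_group_by_grade students → Spec_group_by_grade students (group_by_grade students)

-- ===== LEMMAS AND PROOFS =====

def pvBucket (g : String) (students : List (String × Int)) : List String :=
  (students.filter (fun p => gradeLetter p.2 == g)).map Prod.fst

theorem group_by_grade_fold_items (students : List (String × Int))
    (va vb vc vd vf : List String) :
    (students.foldl group_by_grade_step
      (PySem.Dict.mk [("A", va), ("B", vb), ("C", vc), ("D", vd), ("F", vf)])).items =
    [("A", va ++ pvBucket "A" students), ("B", vb ++ pvBucket "B" students),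
     ("C", vc ++ pvBucket "C" students), ("D", vd ++ pvBucket "D" students),
     ("F", vf ++ pvBucket "F" students)] := by
  induction students generalizing va vb vc vd vf with
  | nil => simp [pvBucket]
  | cons hd tl ih =>
    obtain ⟨name, score⟩ := hd
    by_cases h90 : score ≥ 90
    · have h60 : score ≥ 60 := by omega
      have h70 : score ≥ 70 := by omega
      have h80 : score ≥ 80 := by omega
      simp [List.foldl_cons, group_by_grade_step, h90, PySem.Dict.modify, PySem.Dict.getD, PySem.Dict.get?, PySem.Dict.insert, PySem.Dict.contains, ih, pvBucket,
        gradeLetter, h60, h70, h80]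
    · by_cases h80 : score ≥ 80
      · have h60 : score ≥ 60 := by omega
        have h70 : score ≥ 70 := by omega
        simp [List.foldl_cons, group_by_grade_step, h90, h80, PySem.Dict.modify, PySem.Dict.getD, PySem.Dict.get?, PySem.Dict.insert, PySem.Dict.contains, ih, pvBucket,
          gradeLetter, h60, h70]
      · by_cases h70 : score ≥ 70
        · have h60 : score ≥ 60 := by omega
          simp [List.foldl_cons, group_by_grade_step, h90, h80, h70, PySem.Dict.modify, PySem.Dict.getD, PySem.Dict.get?, PySem.Dict.insert, PySem.Dict.contains, ih, pvBucket,
            gradeLetter, h60]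
        · by_cases h60 : score ≥ 60
          · simp [List.foldl_cons, group_by_grade_step, h90, h80, h70, h60,
              PySem.Dict.modify, PySem.Dict.getD, PySem.Dict.get?, PySem.Dict.insert,
              PySem.Dict.contains, ih, pvBucket, gradeLetter]
          · simp [List.foldl_cons, group_by_grade_step, h90, h80, h70, h60,
              PySem.Dict.modify, PySem.Dict.getD, PySem.Dict.get?, PySem.Dict.insert,
              PySem.Dict.contains, ih, pvBucket, gradeLetter]

-- ===== VERDICT (by name: the statement is the Claim_ definition above) =====
theorem group_by_grade_spec : Claim_equal_group_by_grade := by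
  intro students _
  unfold Spec_group_by_grade group_by_grade group_by_grade_alt
  have e : PySem.Dict.ofList ([("A", []), ("B", []), ("C", []), ("D", []), ("F", [])] : List (String × List String)) =
      PySem.Dict.mk [("A", []), ("B", []), ("C", []), ("D", []), ("F", [])] := by decide
  rw [e, group_by_grade_fold_items students [] [] [] [] []]
  simp [pvBucket]
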